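-- pv_equiv track=rewrite | github.com/Daniel-Wu-Github/102-Python-Projects | how_many_gadgets.py | produceGadgets
-- ===== SOURCE A (Python) =====
-- def produceGadgets (c):
--     days = 1
--     gadgets = 0
--     while days <= c and days < 11:
--         gadgets += 10
--         days += 1
--     while days <= c and days < 51:
--         gadgets += days
--         days += 1
--     while days <= c and days < 101:
--         gadgets += 50
--         days += 1
--     if days == 101:
--         pass
--     return (days, gadgets)
-- ===== SOURCE B (Python) =====
-- def produceGadgets(c):
--     d = max(1, min(c + 1, 101))
--     p = d - 1  # days fully processed
--     g1 = 10 * max(0, min(p, 10))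
--     hi = max(10, min(p, 50))
--     g2 = (hi * (hi + 1) - 110) // 2
--     g3 = 50 * max(0, min(p, 100) - 50)
--     return (d, g1 + g2 + g3)
-- ===== Notes on version B (the rewrite author's own statement) =====
-- stated objective: simpler
-- what changed: Replaces the three accumulation while-loops by a direct computation: the final day is max(1, min(c+1, 101)) and the gadget total is the sum of three clamped closed-form pieces (flat 10s, arithmetic series 11..50, flat 50s), constant time instead of up to 100 iterations.
import Mathlib
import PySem

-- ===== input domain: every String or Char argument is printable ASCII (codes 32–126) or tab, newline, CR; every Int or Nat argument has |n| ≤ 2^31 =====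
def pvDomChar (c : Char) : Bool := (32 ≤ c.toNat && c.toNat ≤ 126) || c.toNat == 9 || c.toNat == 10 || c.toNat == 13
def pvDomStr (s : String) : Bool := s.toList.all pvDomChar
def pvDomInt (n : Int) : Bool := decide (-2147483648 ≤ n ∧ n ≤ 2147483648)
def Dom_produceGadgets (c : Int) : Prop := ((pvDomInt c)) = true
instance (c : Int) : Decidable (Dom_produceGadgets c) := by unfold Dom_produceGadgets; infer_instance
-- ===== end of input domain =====

-- B replaces the three accumulation loops by closed-form clamped sums (simpler, constant time).
-- ===== PORT A =====
-- while days <= c and days < 11: gadgets += 10; days += 1   (fuel only makes termination structural)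
def pvLoop1 (fuel : Nat) (c days gadgets : Int) : Int × Int :=
  match fuel with
  | 0 => (days, gadgets)
  | fuel + 1 =>
    if days ≤ c ∧ days < 11 then pvLoop1 fuel c (days + 1) (gadgets + 10)
    else (days, gadgets)

-- while days <= c and days < 51: gadgets += days; days += 1
def pvLoop2 (fuel : Nat) (c days gadgets : Int) : Int × Int :=
  match fuel with
  | 0 => (days, gadgets)
  | fuel + 1 =>
    if days ≤ c ∧ days < 51 then pvLoop2 fuel c (days + 1) (gadgets + days)
    else (days, gadgets)

-- while days <= c and days < 101: gadgets += 50; days += 1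
def pvLoop3 (fuel : Nat) (c days gadgets : Int) : Int × Int :=
  match fuel with
  | 0 => (days, gadgets)
  | fuel + 1 =>
    if days ≤ c ∧ days < 101 then pvLoop3 fuel c (days + 1) (gadgets + 50)
    else (days, gadgets)

def produceGadgets (c : Int) : Int × Int :=
  let s1 := pvLoop1 11 c 1 0
  let s2 := pvLoop2 51 c s1.1 s1.2
  let s3 := pvLoop3 101 c s2.1 s2.2
  -- 'if days == 101: pass' is a no-op
  (s3.1, s3.2)

-- ===== PORT B =====
def produceGadgets_alt (c : Int) : Int × Int :=
  let d := max 1 (min (c + 1) 101)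
  let p := d - 1
  let g1 := 10 * max 0 (min p 10)
  let hi := max 10 (min p 50)
  let g2 := PySem.Int.floordiv (hi * (hi + 1) - 110) 2
  let g3 := 50 * (max 0 (min p 100 - 50))
  (d, g1 + g2 + g3)

-- ===== PRECONDITION & SPEC =====
def Spec_produceGadgets (c : Int) (out : Int × Int) : Prop := out = produceGadgets_alt c
instance (c : Int) (out : Int × Int) : Decidable (Spec_produceGadgets c out) := by unfold Spec_produceGadgets; infer_instance

-- ===== CLAIM (what is proved, stated in full; the proofs are below) =====
def Claim_equal_produceGadgets : Prop := ∀ (c : Int), Dom_produceGadgets c → Spec_produceGadgets c (produceGadgets c)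

-- ===== LEMMAS AND PROOFS =====

-- ===== VERDICT (by name: the statement is the Claim_ definition above) =====
theorem pvLoop1_spec (c : Int) : ∀ (fuel : Nat) (days g : Int), days ≤ 11 → 11 - days ≤ (fuel : Int) →
    pvLoop1 fuel c days g =
      (max days (min (c + 1) 11), g + 10 * (max days (min (c + 1) 11) - days)) := by
  intro fuel
  induction fuel with
  | zero =>
    intro days g h1 h2
    have hd : max days (min (c + 1) 11) = days := by simp at h2; omega
    rw [hd]
    simp [pvLoop1]
  | succ n ih =>
    intro days g h1 h2
    simp only [pvLoop1]
    by_cases h : days ≤ c ∧ days < 11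
    · rw [if_pos h, ih (days + 1) (g + 10) (by omega) (by push_cast at h2; omega)]
      have hE : max (days + 1) (min (c + 1) 11) = max days (min (c + 1) 11) := by omega
      rw [hE, Prod.mk.injEq]
      exact ⟨rfl, by ring⟩
    · rw [if_neg h]
      have hd : max days (min (c + 1) 11) = days := by omega
      rw [hd, Prod.mk.injEq]
      exact ⟨rfl, by ring⟩

theorem pvLoop2_spec (c : Int) : ∀ (fuel : Nat) (days g : Int), days ≤ 51 → 51 - days ≤ (fuel : Int) →
    pvLoop2 fuel c days g =
      (max days (min (c + 1) 51),
        g + (max days (min (c + 1) 51) * (max days (min (c + 1) 51) - 1) - days * (days - 1)) / 2) := by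
  intro fuel
  induction fuel with
  | zero =>
    intro days g h1 h2
    have hd : max days (min (c + 1) 51) = days := by simp at h2; omega
    rw [hd]
    simp [pvLoop2]
  | succ n ih =>
    intro days g h1 h2
    simp only [pvLoop2]
    by_cases h : days ≤ c ∧ days < 51
    · rw [if_pos h, ih (days + 1) (g + days) (by omega) (by push_cast at h2; omega)]
      have hE : max (days + 1) (min (c + 1) 51) = max days (min (c + 1) 51) := by omega
      rw [hE, Prod.mk.injEq]
      refine ⟨rfl, ?_⟩
      set E := max days (min (c + 1) 51) with hEdef
      have hnum : E * (E - 1) - days * (days - 1) = (E * (E - 1) - (days + 1) * (days + 1 - 1)) + days * 2 := by ring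
      rw [hnum, Int.add_mul_ediv_right _ _ (by norm_num : (2 : Int) ≠ 0)]
      ring
    · rw [if_neg h]
      have hd : max days (min (c + 1) 51) = days := by omega
      rw [hd]
      simp

theorem pvLoop3_spec (c : Int) : ∀ (fuel : Nat) (days g : Int), days ≤ 101 → 101 - days ≤ (fuel : Int) →
    pvLoop3 fuel c days g =
      (max days (min (c + 1) 101), g + 50 * (max days (min (c + 1) 101) - days)) := by
  intro fuel
  induction fuel with
  | zero =>
    intro days g h1 h2
    have hd : max days (min (c + 1) 101) = days := by simp at h2; omega
    rw [hd]
    simp [pvLoop3]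
  | succ n ih =>
    intro days g h1 h2
    simp only [pvLoop3]
    by_cases h : days ≤ c ∧ days < 101
    · rw [if_pos h, ih (days + 1) (g + 50) (by omega) (by push_cast at h2; omega)]
      have hE : max (days + 1) (min (c + 1) 101) = max days (min (c + 1) 101) := by omega
      rw [hE, Prod.mk.injEq]
      exact ⟨rfl, by ring⟩
    · rw [if_neg h]
      have hd : max days (min (c + 1) 101) = days := by omega
      rw [hd, Prod.mk.injEq]
      exact ⟨rfl, by ring⟩

-- A in closed form: stop points e1 ≤ e2 ≤ e3 of the three loops
theorem pvA_closed (c : Int) :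
    produceGadgets c =
      (max (max (max 1 (min (c + 1) 11)) (min (c + 1) 51)) (min (c + 1) 101),
        0 + 10 * (max 1 (min (c + 1) 11) - 1)
          + (max (max 1 (min (c + 1) 11)) (min (c + 1) 51) *
               (max (max 1 (min (c + 1) 11)) (min (c + 1) 51) - 1)
             - max 1 (min (c + 1) 11) * (max 1 (min (c + 1) 11) - 1)) / 2
          + 50 * (max (max (max 1 (min (c + 1) 11)) (min (c + 1) 51)) (min (c + 1) 101)
                  - max (max 1 (min (c + 1) 11)) (min (c + 1) 51))) := by
  simp only [produceGadgets]
  rw [pvLoop1_spec c 11 1 0 (by norm_num) (by norm_num)]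
  rw [pvLoop2_spec c 51 _ _ (by omega) (by push_cast; omega)]
  rw [pvLoop3_spec c 101 _ _ (by omega) (by push_cast; omega)]

-- ===== VERDICT (by name: the statement is the Claim_ definition above) =====
theorem produceGadgets_spec : Claim_equal_produceGadgets := by
  intro c _
  show produceGadgets c = produceGadgets_alt c
  rw [pvA_closed]
  simp only [produceGadgets_alt]
  rw [PySem.Int.floordiv_eq_ediv_of_pos (by norm_num)]
  rw [Prod.mk.injEq]
  constructor
  · omega
  · rcases le_or_gt c 10 with hc | hc
    · -- all stop points equal max 1 (c+1); both quadratic terms vanish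
      have h1 : max 1 (min (c + 1) 11) = max 1 (c + 1) := by omega
      have h2 : max (max 1 (c + 1)) (min (c + 1) 51) = max 1 (c + 1) := by omega
      have h3 : max (max 1 (c + 1)) (min (c + 1) 101) = max 1 (c + 1) := by omega
      have h4 : max 10 (min (max 1 (min (c + 1) 101) - 1) 50) = 10 := by omega
      rw [h1, h2, h3, h4]
      have hz : max 1 (c + 1) * (max 1 (c + 1) - 1) - max 1 (c + 1) * (max 1 (c + 1) - 1) = 0 := by ring
      rw [hz]
      norm_num
      omega
    · rcases le_or_gt c 50 with hc2 | hc2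
      · have h1 : max 1 (min (c + 1) 11) = 11 := by omega
        have h2 : max (11 : Int) (min (c + 1) 51) = c + 1 := by omega
        have h3 : max (c + 1) (min (c + 1) 101) = c + 1 := by omega
        have h4 : max 10 (min (max 1 (min (c + 1) 101) - 1) 50) = c := by omega
        have h5 : max 0 (min (max 1 (min (c + 1) 101) - 1) 10) = 10 := by omega
        have h6 : max 0 (min (max 1 (min (c + 1) 101) - 1) 100 - 50) = 0 := by omega
        rw [h1, h2, h3, h4, h5, h6]
        have hnum : (c + 1) * (c + 1 - 1) - 11 * (11 - 1 : Int) = c * (c + 1) - 110 := by ring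
        rw [hnum]
        ring_nf
      · have h1 : max 1 (min (c + 1) 11) = 11 := by omega
        have h2 : max (11 : Int) (min (c + 1) 51) = 51 := by omega
        have h3 : max (51 : Int) (min (c + 1) 101) = min (c + 1) 101 := by omega
        have h4 : max 10 (min (max 1 (min (c + 1) 101) - 1) 50) = 50 := by omega
        have h5 : max 0 (min (max 1 (min (c + 1) 101) - 1) 10) = 10 := by omega
        have h6 : max 0 (min (max 1 (min (c + 1) 101) - 1) 100 - 50) = min (c + 1) 101 - 51 := by omega
        rw [h1, h2, h3, h4, h5, h6]
        norm_num
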